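-- pv_equiv track=rewrite | github.com/stelioszach03/intro_to_python_ai | Project0/tutorial/parentheses.py | complete_parentheses
-- ===== SOURCE A (Python) =====
-- def complete_parentheses(expression):
--     """
--     Συμπληρώνει τις αριστερές παρενθέσεις σε μια αριθμητική παράσταση χωρίς αριστερές παρενθέσεις.
--
--     Args:
--         expression (list of str): Μια λίστα που αντιπροσωπεύει την αριθμητική παράσταση χωρίς αριστερές παρενθέσεις.
--
--     Returns:
--         list of str: Η αριθμητική παράσταση με σωστά τοποθετημένες αριστερές παρενθέσεις.
--     """
--     result = []  # Λίστα για την τελική παράσταση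
--     stack = []   # Στοίβα για την παρακολούθηση των τελεστών
--
--     for token in expression:
--         if token == ')':
--             if stack:
--                 # Τοποθέτηση '(' πριν τον τελευταίο τελεστή
--                 pos = stack.pop()
--                 result.insert(pos, '(')
--             else:
--                 # Τοποθέτηση '(' στην αρχή αν δεν υπάρχει τελεστής
--                 result.insert(0, '(')
--             # Προσθήκη της ')'
--             result.append(token)
--         else:
--             # Προσθήκη του token στο αποτέλεσμα
--             result.append(token)
--             # Αν είναι τελεστής, αποθήκευση της θέσης για πιθανή '('
--             if token in ['+', '-', '*', '/']:
--                 stack.append(len(result))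
--
--     # Προσθήκη εναπομεινάντων '(' αν υπάρχουν
--     while stack:
--         pos = stack.pop()
--         result.insert(pos, '(')
--
--     return result
-- ===== SOURCE B (Python) =====
-- def complete_parentheses(expression):
--     # One pass records how many '(' belong in each slot (at the start / right after
--     # token i); a second pass builds the output once, with no list.insert mutation.
--     n = len(expression)
--     opens = [0] * (n + 1)  # opens[0] = '(' at the very start; opens[i+1] = '(' right after token i
--     stack = []
--     for i, token in enumerate(expression):
--         if token == ')':
--             if stack:
--                 opens[stack.pop() + 1] += 1
--             else:
--                 opens[0] += 1
--         elif token in ('+', '-', '*', '/'):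
--             stack.append(i)
--     while stack:
--         opens[stack.pop() + 1] += 1
--     out = ['('] * opens[0]
--     for i, token in enumerate(expression):
--         out.append(token)
--         out.extend(['('] * opens[i + 1])
--     return out
-- ===== Notes on version B (the rewrite author's own statement) =====
-- stated objective: alternative
-- what changed: Instead of repeatedly calling list.insert on the growing result, B does one pass recording how many '(' belong in each slot (at the start / right after each token) and then builds the output in a single second pass.
import Mathlib
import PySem

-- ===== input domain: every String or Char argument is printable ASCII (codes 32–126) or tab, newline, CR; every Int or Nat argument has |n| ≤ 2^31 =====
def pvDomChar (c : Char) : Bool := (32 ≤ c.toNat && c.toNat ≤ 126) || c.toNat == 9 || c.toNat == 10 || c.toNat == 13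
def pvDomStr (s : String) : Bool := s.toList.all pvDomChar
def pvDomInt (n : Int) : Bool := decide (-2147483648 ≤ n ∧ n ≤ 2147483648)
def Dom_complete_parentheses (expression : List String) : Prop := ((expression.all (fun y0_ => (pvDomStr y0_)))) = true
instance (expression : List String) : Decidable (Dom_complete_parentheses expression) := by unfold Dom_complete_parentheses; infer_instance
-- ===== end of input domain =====

-- B: instead of A's repeated list.insert into a growing result, one pass records how many '('
-- belong in each slot and a single build pass emits the output (alternative algorithm).

-- ===== PORT A =====
-- Python stack: head of the Lean list is the top (stack.append = cons, stack.pop = head).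
def aLoop (rem : List String) (result : List String) (stack : List Int) : List String × List Int :=
  match rem with
  | [] => (result, stack)
  | token :: rest =>
    if token = ")" then
      match stack with
      | pos :: s => aLoop rest (PySem.List.insert result pos "(" ++ [token]) s
      | [] => aLoop rest (PySem.List.insert result 0 "(" ++ [token]) []
    else
      let result' := result ++ [token]
      if token = "+" ∨ token = "-" ∨ token = "*" ∨ token = "/" then
        aLoop rest result' (PySem.List.len result' :: stack)
      else
        aLoop rest result' stack

def aFinish (stack : List Int) (result : List String) : List String :=
  match stack with
  | [] => result
  | pos :: s => aFinish s (PySem.List.insert result pos "(")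

def complete_parentheses (expression : List String) : List String :=
  aFinish (aLoop expression [] []).2 (aLoop expression [] []).1

-- ===== PORT B =====
-- opens[0] = number of '(' at the very start; opens[i+1] = number of '(' right after token i.
def bLoop (rem : List String) (i : Nat) (opens : List Nat) (stack : List Nat) : List Nat × List Nat :=
  match rem with
  | [] => (opens, stack)
  | token :: rest =>
    if token = ")" then
      match stack with
      | j :: s => bLoop rest (i + 1) (opens.modify (j + 1) (· + 1)) s
      | [] => bLoop rest (i + 1) (opens.modify 0 (· + 1)) []
    else if token = "+" ∨ token = "-" ∨ token = "*" ∨ token = "/" then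
      bLoop rest (i + 1) opens (i :: stack)
    else
      bLoop rest (i + 1) opens stack

def bFinish (stack : List Nat) (opens : List Nat) : List Nat :=
  match stack with
  | [] => opens
  | j :: s => bFinish s (opens.modify (j + 1) (· + 1))

def bBuild (opens : List Nat) (i : Nat) (toks : List String) : List String :=
  match toks with
  | [] => []
  | t :: rest => (t :: List.replicate (opens.getD (i + 1) 0) "(") ++ bBuild opens (i + 1) rest

def complete_parentheses_alt (expression : List String) : List String :=
  let r := bLoop expression 0 (List.replicate (expression.length + 1) 0) []
  let opens := bFinish r.2 r.1
  List.replicate (opens.getD 0 0) "(" ++ bBuild opens 0 expression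

-- ===== PRECONDITION & SPEC =====
def Spec_complete_parentheses (expression : List String) (out : List String) : Prop := out = complete_parentheses_alt expression
instance (expression : List String) (out : List String) : Decidable (Spec_complete_parentheses expression out) := by unfold Spec_complete_parentheses; infer_instance

-- ===== CLAIM (what is proved, stated in full; the proofs are below) =====
def Claim_equal_complete_parentheses : Prop := ∀ (expression : List String), Dom_complete_parentheses expression → Spec_complete_parentheses expression (complete_parentheses expression)

-- ===== LEMMAS AND PROOFS =====

-- Abstraction: the slot-count list as a function on slot indices.
def gOp (opens : List Nat) : Nat → Nat := fun m => opens.getD m 0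

def bump (f : Nat → Nat) (s : Nat) : Nat → Nat := fun m => if m = s then f m + 1 else f m

-- T f n = f 0 + f 1 + … + f n
def T (f : Nat → Nat) : Nat → Nat
  | 0 => f 0
  | n + 1 => T f n + f (n + 1)

-- the token part of the rendered expression, starting after token index i
def rendTail (f : Nat → Nat) (i : Nat) (toks : List String) : List String :=
  match toks with
  | [] => []
  | t :: rest => (t :: List.replicate (f (i + 1)) "(") ++ rendTail f (i + 1) rest

def rend (f : Nat → Nat) (e : List String) (p : Nat) : List String :=
  List.replicate (f 0) "(" ++ rendTail f 0 (e.take p)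

lemma T_congr (f f' : Nat → Nat) (n : Nat) (h : ∀ m, m ≤ n → f m = f' m) : T f n = T f' n := by
  induction n with
  | zero => simpa [T] using h 0 (le_refl 0)
  | succ n ih => simp [T, ih (fun m hm => h m (by omega)), h (n+1) (le_refl _)]

lemma T_mono (f : Nat → Nat) {n m : Nat} (h : n ≤ m) : T f n ≤ T f m := by
  induction m with
  | zero => have : n = 0 := Nat.le_zero.mp h; simp [this]
  | succ m ih =>
    by_cases h' : n = m + 1
    · simp [h']
    · have h2 := ih (by omega)
      have hT : T f (m + 1) = T f m + f (m + 1) := rfl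
      omega

lemma rendTail_append (f : Nat → Nat) (i : Nat) (xs ys : List String) :
    rendTail f i (xs ++ ys) = rendTail f i xs ++ rendTail f (i + xs.length) ys := by
  induction xs generalizing i with
  | nil => simp [rendTail]
  | cons x xs ih =>
    simp only [rendTail, ih (i + 1), List.length_cons, List.cons_append, List.append_assoc]
    rw [show i + (xs.length + 1) = i + 1 + xs.length from by omega]

lemma rendTail_congr (f f' : Nat → Nat) (i : Nat) (xs : List String)
    (h : ∀ m, i < m → m ≤ i + xs.length → f m = f' m) : rendTail f i xs = rendTail f' i xs := by
  induction xs generalizing i with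
  | nil => rfl
  | cons x xs ih =>
    simp [rendTail, h (i + 1) (by omega) (by simp only [List.length_cons]; omega),
      ih (i + 1) (fun m h1 h2 => h m (by omega) (by simp only [List.length_cons]; omega))]

lemma len_rendTail (f : Nat → Nat) (xs : List String) (i : Nat) :
    T f i + (rendTail f i xs).length = xs.length + T f (i + xs.length) := by
  induction xs generalizing i with
  | nil => simp [rendTail]
  | cons x xs ih =>
    have hih := ih (i + 1)
    simp only [rendTail, List.length_append, List.length_cons, List.length_replicate]
    rw [show i + (xs.length + 1) = i + 1 + xs.length from by omega]
    have hT : T f (i + 1) = T f i + f (i + 1) := rfl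
    omega

lemma len_rend (f : Nat → Nat) (e : List String) (p : Nat) (hp : p ≤ e.length) :
    (rend f e p).length = p + T f p := by
  have h := len_rendTail f (e.take p) 0
  have hl : (e.take p).length = p := by simp [hp]
  simp only [hl, Nat.zero_add] at h
  have hT : T f 0 = f 0 := rfl
  simp only [rend, List.length_append, List.length_replicate]
  omega

lemma take_take_add (e : List String) (j p : Nat) (h : j ≤ p) :
    e.take p = e.take j ++ (e.take p).drop j := by
  conv_lhs => rw [← List.take_append_drop j (e.take p)]
  rw [List.take_take, Nat.min_eq_left h]

lemma rend_split (f : Nat → Nat) (e : List String) (j p : Nat) (hj : j < p) (hp : p ≤ e.length) :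
    rend f e p = rend f e (j + 1) ++ rendTail f (j + 1) ((e.take p).drop (j + 1)) := by
  have hlen : (e.take (j + 1)).length = j + 1 := by simp; omega
  calc rend f e p = List.replicate (f 0) "(" ++ rendTail f 0 (e.take (j+1) ++ (e.take p).drop (j+1)) := by
        rw [rend, ← take_take_add e (j+1) p (by omega)]
    _ = _ := by rw [rendTail_append, hlen, rend]; simp

lemma rend_bump_self (f : Nat → Nat) (e : List String) (j : Nat) (hj : j < e.length) :
    rend (bump f (j + 1)) e (j + 1) = rend f e (j + 1) ++ ["("] := by
  have htake : e.take (j + 1) = e.take j ++ [e[j]] := by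
    rw [List.take_add_one]; simp [List.getElem?_eq_getElem hj]
  have hlenj : (e.take j).length = j := by simp; omega
  simp only [rend, htake, rendTail_append, hlenj]
  rw [rendTail_congr (bump f (j+1)) f 0 (e.take j) (fun m h1 h2 => by
    have hm : m ≤ j := by simpa [hlenj] using h2
    simp [bump, show m ≠ j + 1 from by omega])]
  have hb : bump f (j + 1) (j + 1) = f (j + 1) + 1 := by simp [bump]
  have hb0 : bump f (j + 1) 0 = f 0 := by simp [bump]
  simp [rendTail, hb, hb0, List.replicate_succ']

lemma insert_rend (f : Nat → Nat) (e : List String) (j p : Nat) (hj : j < p) (hp : p ≤ e.length) :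
    PySem.List.insert (rend f e p) (((j + 1) + T f (j + 1) : Nat) : Int) "("
      = rend (bump f (j + 1)) e p := by
  have hle : (j + 1) + T f (j + 1) ≤ (rend f e p).length := by
    rw [len_rend f e p hp]
    have := T_mono f (show j + 1 ≤ p by omega)
    omega
  rw [PySem.List.insert_natCast _ _ _ hle]
  have hsplit := rend_split f e j p hj hp
  have hlen1 : (rend f e (j + 1)).length = (j + 1) + T f (j + 1) :=
    len_rend f e (j + 1) (by omega)
  rw [hsplit, ← hlen1]
  simp only [List.take_append, List.drop_append, Nat.sub_self, List.take_length, List.take_zero,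
    List.drop_length, List.drop_zero, List.append_nil, List.nil_append]
  rw [rend_split (bump f (j+1)) e j p hj hp, rend_bump_self f e j (by omega)]
  rw [rendTail_congr (bump f (j+1)) f (j+1) _ (fun m h1 h2 => by
    simp [bump, show m ≠ j + 1 from by omega])]
  simp

lemma insert_rend_zero (f : Nat → Nat) (e : List String) (p : Nat) :
    PySem.List.insert (rend f e p) 0 "(" = rend (bump f 0) e p := by
  rw [PySem.List.insert_zero]
  simp only [rend]
  rw [rendTail_congr (bump f 0) f 0 _ (fun m h1 h2 => by
    simp [bump, show m ≠ 0 from by omega])]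
  have hb : bump f 0 0 = f 0 + 1 := by simp [bump]
  rw [hb, List.replicate_succ]
  rfl

lemma rend_succ (f : Nat → Nat) (e : List String) (p : Nat) (hp : p < e.length)
    (hz : f (p + 1) = 0) : rend f e (p + 1) = rend f e p ++ [e[p]] := by
  have htake : e.take (p + 1) = e.take p ++ [e[p]] := by
    rw [List.take_add_one]; simp [List.getElem?_eq_getElem hp]
  have hlenp : (e.take p).length = p := by simp; omega
  simp only [rend, htake, rendTail_append, hlenp, Nat.zero_add]
  simp only [rendTail, hz, List.replicate_zero, List.append_nil, List.append_assoc]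

lemma gOp_modify (opens : List Nat) (s : Nat) (h : s < opens.length) :
    gOp (opens.modify s (· + 1)) = bump (gOp opens) s := by
  funext m
  simp only [gOp, bump, List.getD, List.getElem?_modify]
  by_cases hm : m = s
  · subst hm; simp [List.getElem?_eq_getElem h]
  · simp [Ne.symm hm, hm]

lemma fin_inv (e : List String) (stB : List Nat) :
    ∀ (opens : List Nat) (result : List String) (stA : List Int),
    opens.length = e.length + 1 →
    result = rend (gOp opens) e e.length →
    stA = stB.map (fun j => (((j + 1) + T (gOp opens) (j + 1) : Nat) : Int)) →
    List.Pairwise (fun a b => b < a) stB →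
    (∀ j ∈ stB, j < e.length) →
    aFinish stA result = rend (gOp (bFinish stB opens)) e e.length := by
  induction stB with
  | nil => intro opens result stA _ hres hstA _ _; subst hstA hres; rfl
  | cons j s ih =>
    intro opens result stA hlen hres hstA hpw hlt
    subst hstA hres
    simp only [List.map_cons, aFinish, bFinish]
    have hj : j < e.length := hlt j (List.mem_cons_self)
    rw [insert_rend (gOp opens) e j e.length hj (le_refl _)]
    rw [← gOp_modify opens (j + 1) (by omega)]
    apply ih _ _ _ (by simp [hlen]) rfl ?_ (List.Pairwise.of_cons hpw)
      (fun j' hj' => hlt j' (List.mem_cons_of_mem _ hj'))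
    rw [List.map_congr_left]
    intro j' hj'
    have hj'j : j' < j := (List.pairwise_cons.mp hpw).1 j' hj'
    rw [gOp_modify opens (j + 1) (by omega)]
    rw [T_congr (bump (gOp opens) (j+1)) (gOp opens) (j' + 1)
      (fun m hm => by simp [bump]; omega)]

lemma sim (e : List String) (rem : List String) :
    ∀ (p : Nat) (opens : List Nat) (stB : List Nat) (result : List String) (stA : List Int),
    e.drop p = rem →
    p ≤ e.length →
    opens.length = e.length + 1 →
    (∀ m, p < m → gOp opens m = 0) →
    result = rend (gOp opens) e p →
    stA = stB.map (fun j => (((j + 1) + T (gOp opens) (j + 1) : Nat) : Int)) →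
    List.Pairwise (fun a b => b < a) stB →
    (∀ j ∈ stB, j < p) →
    aFinish (aLoop rem result stA).2 (aLoop rem result stA).1
      = rend (gOp (bFinish (bLoop rem p opens stB).2 (bLoop rem p opens stB).1)) e e.length := by
  induction rem with
  | nil =>
    intro p opens stB result stA hdrop hp hlen hzero hres hstA hpw hlt
    have hple : p = e.length := by
      have := congrArg List.length hdrop; simp at this; omega
    subst hple
    simp only [aLoop, bLoop]
    exact fin_inv e stB opens result stA hlen hres hstA hpw hlt
  | cons token rest ih =>
    intro p opens stB result stA hdrop hp hlen hzero hres hstA hpw hlt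
    have hplt : p < e.length := by
      have := congrArg List.length hdrop; simp at this; omega
    have htok : e[p] = token := by
      have h0 : (e.drop p)[0]? = some token := by rw [hdrop]; rfl
      rw [List.getElem?_drop] at h0
      simpa [List.getElem?_eq_getElem hplt] using h0
    have hrest : e.drop (p + 1) = rest := by
      have h1 : (e.drop p).tail = rest := by rw [hdrop]; rfl
      rw [← h1, List.tail_drop]
    by_cases ht : token = ")"
    · subst ht
      cases stB with
      | nil =>
        subst hstA
        simp only [aLoop, bLoop, List.map_nil]
        have hg : gOp (opens.modify 0 (· + 1)) = bump (gOp opens) 0 :=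
          gOp_modify opens 0 (by omega)
        apply ih (p + 1) (opens.modify 0 (· + 1)) [] _ _ hrest (by omega) (by simp [hlen])
        · intro m hm; rw [hg]; simp [bump, show m ≠ 0 from by omega]; exact hzero m (by omega)
        · rw [hres, insert_rend_zero (gOp opens) e p, ← hg,
            rend_succ (gOp (opens.modify 0 (· + 1))) e p hplt
              (by rw [hg]; simp [bump]; exact hzero (p + 1) (by omega)), htok]
        · simp
        · simp
        · simp
      | cons j s =>
        subst hstA
        simp only [aLoop, bLoop, List.map_cons]
        have hjp : j < p := hlt j List.mem_cons_self
        have hg : gOp (opens.modify (j + 1) (· + 1)) = bump (gOp opens) (j + 1) :=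
          gOp_modify opens (j + 1) (by omega)
        apply ih (p + 1) (opens.modify (j + 1) (· + 1)) s _ _ hrest (by omega) (by simp [hlen])
        · intro m hm; rw [hg]; simp [bump, show m ≠ j + 1 from by omega]
          exact hzero m (by omega)
        · rw [hres, insert_rend (gOp opens) e j p hjp (by omega), ← hg,
            rend_succ (gOp (opens.modify (j + 1) (· + 1))) e p hplt
              (by rw [hg]; simp only [bump]
                  rw [if_neg (show ¬ (p + 1) = j + 1 from by omega)]
                  exact hzero (p + 1) (by omega)), htok]
        · apply List.map_congr_left
          intro j' hj'
          have hj'j : j' < j := (List.pairwise_cons.mp hpw).1 j' hj'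
          rw [hg, T_congr (bump (gOp opens) (j + 1)) (gOp opens) (j' + 1)
            (fun m hm => by simp [bump, show m ≠ j + 1 from by omega])]
        · exact List.Pairwise.of_cons hpw
        · exact fun j' hj' => by have := hlt j' (List.mem_cons_of_mem _ hj'); omega
    · have hres1 : result ++ [token] = rend (gOp opens) e (p + 1) := by
        rw [hres, rend_succ (gOp opens) e p hplt (hzero (p + 1) (by omega)), htok]
      by_cases hop : token = "+" ∨ token = "-" ∨ token = "*" ∨ token = "/"
      · simp only [aLoop, bLoop, if_neg ht, if_pos hop]
        apply ih (p + 1) opens (p :: stB) _ _ hrest (by omega) hlen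
          (fun m hm => hzero m (by omega)) hres1
        · simp only [List.map_cons, hstA]
          congr 1
          have hl1 : (result ++ [token]).length = (p + T (gOp opens) p) + 1 := by
            rw [hres, List.length_append, len_rend (gOp opens) e p (by omega)]; rfl
          have hT1 : T (gOp opens) (p + 1) = T (gOp opens) p + gOp opens (p + 1) := rfl
          simp only [PySem.List.len, hl1, hT1, hzero (p + 1) (by omega)]
          push_cast; ring
        · exact List.pairwise_cons.mpr ⟨fun j' hj' => by have := hlt j' hj'; omega, hpw⟩
        · intro j' hj'
          rcases List.mem_cons.mp hj' with h | h
          · omega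
          · have := hlt j' h; omega
      · simp only [aLoop, bLoop, if_neg ht, if_neg hop]
        exact ih (p + 1) opens stB _ _ hrest (by omega) hlen
          (fun m hm => hzero m (by omega)) hres1 hstA hpw
          (fun j' hj' => by have := hlt j' hj'; omega)

-- bBuild is exactly rendTail of the final counts
lemma bBuild_eq_rendTail (opens : List Nat) (toks : List String) :
    ∀ i, bBuild opens i toks = rendTail (gOp opens) i toks := by
  induction toks with
  | nil => intro i; rfl
  | cons t rest ih => intro i; simp [bBuild, rendTail, gOp, ih]

-- ===== VERDICT (by name: the statement is the Claim_ definition above) =====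
lemma gOp_replicate (k m : Nat) : gOp (List.replicate k 0) m = 0 := by
  simp only [gOp, List.getD, List.getElem?_replicate]
  split <;> simp

theorem complete_parentheses_spec : Claim_equal_complete_parentheses := by
  intro e _
  unfold Spec_complete_parentheses complete_parentheses
  have halt : complete_parentheses_alt e =
      List.replicate ((bFinish (bLoop e 0 (List.replicate (e.length + 1) 0) []).2
          (bLoop e 0 (List.replicate (e.length + 1) 0) []).1).getD 0 0) "(" ++
        bBuild (bFinish (bLoop e 0 (List.replicate (e.length + 1) 0) []).2
          (bLoop e 0 (List.replicate (e.length + 1) 0) []).1) 0 e := rfl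
  have h := sim e e 0 (List.replicate (e.length + 1) 0) [] [] []
    (by simp) (by omega) (by simp)
    (fun m _ => gOp_replicate _ _)
    (by simp [rend, rendTail, gOp_replicate])
    rfl (by simp) (by simp)
  rw [h, halt, bBuild_eq_rendTail]
  simp only [rend, List.take_length]
  rfl
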